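-- pv_equiv track=rewrite | github.com/fadhilatulistiqomah/monitoring_cuaca_ekstrem | download_harian.py | ambil_sandi55
-- ===== SOURCE A (Python) =====
-- def ambil_sandi55(teks):
--     if not isinstance(teks, str):
--         return None
--     tokens = teks.split()
--     for t in tokens:
--         if t.startswith('55'):
--             return t
--     return None
-- ===== SOURCE B (Python) =====
-- def ambil_sandi55(teks):
--     if not isinstance(teks, str):
--         return None
--     i, n = 0, len(teks)
--     while i < n:
--         if teks[i].isspace():
--             i += 1
--         else:
--             j = i
--             while j < n and not teks[j].isspace():
--                 j += 1
--             tok = teks[i:j]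
--             if tok.startswith('55'):
--                 return tok
--             i = j
--     return None
-- ===== Notes on version B (the rewrite author's own statement) =====
-- stated objective: alternative
-- what changed: B scans the string once with an index (skip whitespace, read one token, test it) instead of A's teks.split() building the whole token list before the linear search.
import Mathlib
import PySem

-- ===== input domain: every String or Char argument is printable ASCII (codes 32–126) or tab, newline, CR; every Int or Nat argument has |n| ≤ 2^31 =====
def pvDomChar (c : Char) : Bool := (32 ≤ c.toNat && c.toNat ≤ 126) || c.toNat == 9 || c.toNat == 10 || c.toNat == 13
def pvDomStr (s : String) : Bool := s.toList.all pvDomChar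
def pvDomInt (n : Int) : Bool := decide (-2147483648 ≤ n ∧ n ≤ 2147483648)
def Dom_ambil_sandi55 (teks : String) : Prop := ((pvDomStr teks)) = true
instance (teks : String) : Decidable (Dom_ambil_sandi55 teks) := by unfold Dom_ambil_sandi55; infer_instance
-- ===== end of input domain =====

-- B replaces A's split-into-a-token-list-then-scan with a single direct scan over the
-- characters that never materialises the token list (objective: alternative; same cost).
-- Equivalence is about the return value; neither version mutates its argument.

-- ===== PORT A =====
-- 'for t in tokens: if t.startswith("55"): return t' / 'return None'
def ambilFindTok : List String → Option String
  | [] => none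
  | t :: ts => if PySem.Str.startswith t "55" then some t else ambilFindTok ts

-- the 'isinstance' guard is vacuous under the type convention (teks is always a str)
def ambil_sandi55 (teks : String) : Option String :=
  ambilFindTok (PySem.Str.split₀ teks)

-- ===== PORT B =====
-- inner 'while j < n and not teks[j].isspace(): j += 1' plus the slice teks[i:j]:
-- returns (the non-space prefix from position i, the remaining characters from j on)
def ambilGrab : List Char → List Char × List Char
  | [] => ([], [])
  | d :: rest =>
    if PySem.Chars.isspace d then ([], d :: rest)
    else
      let p := ambilGrab rest
      (d :: p.1, p.2)

theorem ambilGrab_snd_le (cs : List Char) : (ambilGrab cs).2.length ≤ cs.length := by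
  induction cs with
  | nil => simp [ambilGrab]
  | cons d rest ih =>
    by_cases h : PySem.Chars.isspace d <;> simp [ambilGrab, h]
    omega

-- outer 'while i < n' loop: skip a space, or grab a token, test it, continue after it
def ambilScan : List Char → Option String
  | [] => none
  | c :: rest =>
    if PySem.Chars.isspace c then ambilScan rest
    else
      let p := ambilGrab (c :: rest)
      if PySem.Chars.startswith p.1 ['5', '5'] then some (String.ofList p.1)
      else ambilScan p.2
  termination_by cs => cs.length
  decreasing_by
  · simp
  · have hle := ambilGrab_snd_le rest
    simp only [ambilGrab]
    split
    · rename_i hs; exact absurd hs (by assumption)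
    · simp; omega

def ambil_sandi55_alt (teks : String) : Option String :=
  ambilScan teks.toList

-- ===== PRECONDITION & SPEC =====
def Spec_ambil_sandi55 (teks : String) (out : Option String) : Prop := out = ambil_sandi55_alt teks
instance (teks : String) (out : Option String) : Decidable (Spec_ambil_sandi55 teks out) := by unfold Spec_ambil_sandi55; infer_instance

-- ===== CLAIM (what is proved, stated in full; the proofs are below) =====
def Claim_equal_ambil_sandi55 : Prop := ∀ (teks : String), Dom_ambil_sandi55 teks → Spec_ambil_sandi55 teks (ambil_sandi55 teks)

-- ===== LEMMAS AND PROOFS =====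

-- grab computes exactly the takeWhile/dropWhile split at the first whitespace
theorem ambilGrab_eq (cs : List Char) :
    ambilGrab cs = (cs.takeWhile (fun d => !PySem.Chars.isspace d),
                    cs.dropWhile (fun d => !PySem.Chars.isspace d)) := by
  induction cs with
  | nil => simp [ambilGrab]
  | cons d rest ih =>
    by_cases h : PySem.Chars.isspace d <;>
      simp [ambilGrab, h, List.takeWhile, List.dropWhile, ih]

-- split₀ drops a leading space
theorem split0_cons_space {c : Char} (rest : List Char) (h : PySem.Chars.isspace c = true) :
    PySem.Chars.split₀ (c :: rest) = PySem.Chars.split₀ rest := by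
  simp [PySem.Chars.split₀, PySem.Chars.split₀.go, h]

-- the go accumulator: with a non-empty current token it finishes that token first
theorem split0_go_token (rest : List Char) :
    ∀ cur acc, cur ≠ [] →
      PySem.Chars.split₀.go rest cur acc =
        PySem.Chars.split₀.go (rest.dropWhile (fun d => !PySem.Chars.isspace d)) []
          ((cur.reverse ++ rest.takeWhile (fun d => !PySem.Chars.isspace d)) :: acc) := by
  induction rest with
  | nil =>
    intro cur acc hcur
    simp [PySem.Chars.split₀.go, hcur]
  | cons d rest ih =>
    intro cur acc hcur
    by_cases h : PySem.Chars.isspace d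
    · simp [PySem.Chars.split₀.go, h, hcur, List.takeWhile, List.dropWhile]
    · simp only [PySem.Chars.split₀.go, h, if_neg, Bool.false_eq_true, not_false_eq_true,
        List.takeWhile, List.dropWhile]
      rw [ih (d :: cur) acc (by simp)]
      simp

-- split₀.go with empty current token = accumulated tokens ++ split₀ of the rest
theorem split0_go_nil (cs : List Char) :
    ∀ acc, PySem.Chars.split₀.go cs [] acc = acc.reverse ++ PySem.Chars.split₀ cs := by
  induction hn : cs.length using Nat.strong_induction_on generalizing cs with
  | _ n ih =>
    intro acc
    match cs, hn with
    | [], _ => simp [PySem.Chars.split₀.go, PySem.Chars.split₀]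
    | c :: rest, hn =>
      have hn' : n = rest.length + 1 := by simpa using hn.symm
      by_cases h : PySem.Chars.isspace c
      · rw [show PySem.Chars.split₀.go (c :: rest) [] acc
              = PySem.Chars.split₀.go rest [] acc by simp [PySem.Chars.split₀.go, h]]
        rw [ih rest.length (by omega) rest rfl acc, split0_cons_space rest h]
      · rw [show PySem.Chars.split₀.go (c :: rest) [] acc
              = PySem.Chars.split₀.go rest [c] acc by simp [PySem.Chars.split₀.go, h]]
        rw [split0_go_token rest [c] acc (by simp)]
        have hlen : (rest.dropWhile (fun d => !PySem.Chars.isspace d)).length < n := by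
          have := rest.length_dropWhile_le (fun d => !PySem.Chars.isspace d)
          omega
        rw [ih _ hlen _ rfl]
        rw [show PySem.Chars.split₀ (c :: rest)
              = PySem.Chars.split₀.go rest [c] [] by simp [PySem.Chars.split₀, PySem.Chars.split₀.go, h]]
        rw [split0_go_token rest [c] [] (by simp)]
        rw [ih _ hlen _ rfl]
        simp

-- splitting at a non-space head: the first token is the non-space prefix
theorem split0_cons_nonspace {c : Char} (rest : List Char) (h : ¬ PySem.Chars.isspace c = true) :
    PySem.Chars.split₀ (c :: rest) =
      (c :: rest.takeWhile (fun d => !PySem.Chars.isspace d)) ::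
        PySem.Chars.split₀ (rest.dropWhile (fun d => !PySem.Chars.isspace d)) := by
  rw [show PySem.Chars.split₀ (c :: rest)
        = PySem.Chars.split₀.go rest [c] [] by simp [PySem.Chars.split₀, PySem.Chars.split₀.go, h]]
  rw [split0_go_token rest [c] [] (by simp), split0_go_nil]
  simp

-- the scan of B visits exactly A's tokens in order
theorem ambilScan_eq (cs : List Char) :
    ambilScan cs = ambilFindTok ((PySem.Chars.split₀ cs).map String.ofList) := by
  induction hn : cs.length using Nat.strong_induction_on generalizing cs with
  | _ n ih =>
    match cs, hn with
    | [], _ => simp [ambilScan, ambilFindTok, PySem.Chars.split₀, PySem.Chars.split₀.go]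
    | c :: rest, hn =>
      have hn' : n = rest.length + 1 := by simpa using hn.symm
      by_cases h : PySem.Chars.isspace c
      · rw [show ambilScan (c :: rest) = ambilScan rest by simp [ambilScan, h]]
        rw [split0_cons_space rest h, ih rest.length (by omega) rest rfl]
      · have hgrab := ambilGrab_eq (c :: rest)
        have htw : (c :: rest).takeWhile (fun d => !PySem.Chars.isspace d)
            = c :: rest.takeWhile (fun d => !PySem.Chars.isspace d) := by
          simp [List.takeWhile, h]
        have hdw : (c :: rest).dropWhile (fun d => !PySem.Chars.isspace d)
            = rest.dropWhile (fun d => !PySem.Chars.isspace d) := by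
          simp [List.dropWhile, h]
        rw [split0_cons_nonspace rest h]
        rw [show ambilScan (c :: rest)
              = (if PySem.Chars.startswith (ambilGrab (c :: rest)).1 ['5', '5']
                 then some (String.ofList (ambilGrab (c :: rest)).1)
                 else ambilScan (ambilGrab (c :: rest)).2) by
            rw [ambilScan]; simp [h]]
        rw [hgrab, htw, hdw]
        simp only [List.map, ambilFindTok]
        have hsw : PySem.Str.startswith
            (String.ofList (c :: rest.takeWhile (fun d => !PySem.Chars.isspace d))) "55"
            = PySem.Chars.startswith (c :: rest.takeWhile (fun d => !PySem.Chars.isspace d)) ['5', '5'] := by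
          simp [pysem]
        rw [hsw]
        have hlen : (rest.dropWhile (fun d => !PySem.Chars.isspace d)).length < n := by
          have := rest.length_dropWhile_le (fun d => !PySem.Chars.isspace d)
          omega
        rw [ih _ hlen _ rfl]

-- ===== VERDICT (by name: the statement is the Claim_ definition above) =====
theorem ambil_sandi55_spec : Claim_equal_ambil_sandi55 := by
  intro teks _
  unfold Spec_ambil_sandi55 ambil_sandi55 ambil_sandi55_alt
  rw [ambilScan_eq, PySem.Str.split₀]
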